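-- pv_equiv track=rewrite | github.com/DeDTihoN/islab3-gen | main.py | calculate_day_gaps
-- ===== SOURCE A (Python) =====
-- def calculate_day_gaps(slots):
--     # Сортуємо слоти
--     slots.sort()
--
--     # Розбиваємо слоти на блоки по 4, відповідно до множин (1-4, 5-8, 9-12, 13-16, 17-20)
--     gaps = 0
--     daily_blocks = [
--         set(range(1, 5)),  # Блок для слотів 1-4
--         set(range(5, 9)),  # Блок для слотів 5-8
--         set(range(9, 13)),  # Блок для слотів 9-12
--         set(range(13, 17)),  # Блок для слотів 13-16
--         set(range(17, 21))  # Блок для слотів 17-20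
--     ]
--
--     for block in daily_blocks:
--         # Фільтруємо слоти, які потрапляють у поточний блок
--         block_slots = [slot for slot in slots if slot in block]
--
--         # Якщо є більше одного заняття в блоці, перевіряємо розриви
--         if len(block_slots) > 1:
--             for i in range(1, len(block_slots)):
--                 if block_slots[i] - block_slots[i - 1] > 1:  # Перевірка на наявність розриву
--                     gaps += 1
--     return gaps
-- ===== SOURCE B (Python) =====
-- def calculate_day_gaps(slots):
--     # One O(n) pass: mark which of the slot values 1..20 are occupied,
--     # then count gaps between consecutive occupied values inside each
--     # 4-slot daily block (1-4, 5-8, 9-12, 13-16, 17-20).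
--     present = [False] * 21
--     for s in slots:
--         if 1 <= s <= 20:
--             present[s] = True
--     gaps = 0
--     for lo in (1, 5, 9, 13, 17):
--         prev = None
--         for v in range(lo, lo + 4):
--             if present[v]:
--                 if prev is not None and v - prev > 1:
--                     gaps += 1
--                 prev = v
--     return gaps
-- ===== Notes on version B (the rewrite author's own statement) =====
-- stated objective: faster
-- what changed: Replaces sort-then-filter-per-block (5 passes over the sorted list plus membership tests in sets) with a single O(n) presence-bucketing pass over values 1..20 followed by a constant-size scan of the 5 daily blocks.
import Mathlib
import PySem

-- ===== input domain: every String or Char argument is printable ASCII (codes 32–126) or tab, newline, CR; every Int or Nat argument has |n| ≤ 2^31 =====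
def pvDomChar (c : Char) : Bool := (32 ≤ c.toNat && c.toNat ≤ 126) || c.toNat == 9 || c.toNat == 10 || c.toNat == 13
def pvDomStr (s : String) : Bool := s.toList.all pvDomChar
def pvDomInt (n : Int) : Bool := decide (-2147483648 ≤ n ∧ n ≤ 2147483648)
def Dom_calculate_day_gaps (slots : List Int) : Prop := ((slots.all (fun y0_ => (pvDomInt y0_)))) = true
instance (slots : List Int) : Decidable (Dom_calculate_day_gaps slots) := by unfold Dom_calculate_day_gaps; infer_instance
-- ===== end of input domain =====

-- B replaces A's sort + five filtered passes by one O(n) presence-bucketing pass over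
-- the values 1..20 plus a constant-size scan of the five daily blocks (equality is about
-- the RETURN value only: Python A sorts its argument in place, B does not mutate it).

-- ===== PORT A =====
def calculate_day_gaps (slots : List Int) : Int :=
  let slots := PySem.List.sorted slots (fun x => x) false
  let gaps : Int := 0
  let daily_blocks : List (PySem.Set Int) :=
    [PySem.Set.ofList (PySem.List.pyRange 1 5 1),
     PySem.Set.ofList (PySem.List.pyRange 5 9 1),
     PySem.Set.ofList (PySem.List.pyRange 9 13 1),
     PySem.Set.ofList (PySem.List.pyRange 13 17 1),
     PySem.Set.ofList (PySem.List.pyRange 17 21 1)]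
  daily_blocks.foldl (fun gaps block =>
    let block_slots := slots.filter (fun slot => PySem.Set.contains block slot)
    if 1 < block_slots.length then
      (PySem.List.pyRange 1 (block_slots.length : Int) 1).foldl (fun gaps i =>
        if PySem.List.pyGetD block_slots i 0 - PySem.List.pyGetD block_slots (i - 1) 0 > 1
        then gaps + 1 else gaps) gaps
    else gaps) gaps

-- ===== PORT B =====
def calculate_day_gaps_alt (slots : List Int) : Int :=
  let present := slots.foldl (fun present s =>
      if 1 ≤ s ∧ s ≤ 20 then PySem.List.pySetD present s true else present)
    (List.replicate 21 false)
  ([1, 5, 9, 13, 17] : List Int).foldl (fun gaps lo =>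
    ((PySem.List.pyRange lo (lo + 4) 1).foldl
      (fun (st : Int × Option Int) v =>
        if PySem.List.pyGetD present v false then
          ((match st.2 with
            | some prev => if v - prev > 1 then st.1 + 1 else st.1
            | none => st.1), some v)
        else st)
      (gaps, none)).1) 0

-- ===== PRECONDITION & SPEC =====
def Spec_calculate_day_gaps (slots : List Int) (out : Int) : Prop := out = calculate_day_gaps_alt slots
instance (slots : List Int) (out : Int) : Decidable (Spec_calculate_day_gaps slots out) := by unfold Spec_calculate_day_gaps; infer_instance

-- ===== CLAIM (what is proved, stated in full; the proofs are below) =====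
def Claim_equal_calculate_day_gaps : Prop := ∀ (slots : List Int), Dom_calculate_day_gaps slots → Spec_calculate_day_gaps slots (calculate_day_gaps slots)

-- ===== LEMMAS AND PROOFS =====

/-- Number of adjacent pairs with difference > 1 (A's inner loop, head-recursively). -/
def pvGc : List Int → Int
  | a :: b :: t => (if b - a > 1 then 1 else 0) + pvGc (b :: t)
  | _ => 0

/-- Canonical occupied-value list of one daily block `{lo..lo+3}` from presence bits. -/
def pvC (lo : Int) (b0 b1 b2 b3 : Bool) : List Int :=
  (if b0 then [lo] else []) ++ (if b1 then [lo + 1] else []) ++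
  (if b2 then [lo + 2] else []) ++ (if b3 then [lo + 3] else [])

lemma pvGc_short (l : List Int) (h : l.length ≤ 1) : pvGc l = 0 := by
  match l with
  | [] => rfl
  | [a] => rfl
  | a :: b :: t => simp at h

lemma pvGc_dup : ∀ (xs : List Int) (y : Int) (zs : List Int),
    pvGc (xs ++ y :: y :: zs) = pvGc (xs ++ y :: zs) := by
  intro xs
  induction xs with
  | nil => intro y zs; simp [pvGc]
  | cons a xs ih =>
    intro y zs
    match xs with
    | [] => simp [pvGc]
    | c :: xs' =>
      have h := ih y zs
      simp only [List.cons_append] at h ⊢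
      simp only [pvGc, h]

lemma pvGc_rep : ∀ (n : Nat) (xs : List Int) (v : Int) (rest : List Int),
    pvGc (xs ++ List.replicate n v ++ rest) = pvGc (xs ++ (if 0 < n then [v] else []) ++ rest) := by
  intro n
  induction n with
  | zero => intro xs v rest; simp
  | succ k ih =>
    intro xs v rest
    match k with
    | 0 => simp
    | k' + 1 =>
      have : List.replicate (k' + 2) v = v :: v :: List.replicate k' v := rfl
      rw [this]
      have h2 : xs ++ (v :: v :: List.replicate k' v) ++ rest = xs ++ v :: v :: (List.replicate k' v ++ rest) := by simp
      rw [h2, pvGc_dup xs v (List.replicate k' v ++ rest)]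
      have h3 : xs ++ v :: (List.replicate k' v ++ rest) = xs ++ List.replicate (k' + 1) v ++ rest := by simp [List.replicate]
      rw [h3, ih]
      simp

lemma pv_filter_split (s : List Int) (hs : List.Pairwise (· ≤ ·) s) (v : Int)
    (P : Int → Bool) (hP : ∀ x, P x = true → v < x) :
    s.filter (fun x => x == v || P x) = s.filter (fun x => x == v) ++ s.filter P := by
  induction s with
  | nil => simp
  | cons a t ih =>
    have ha : ∀ b ∈ t, a ≤ b := fun b hb => (List.pairwise_cons.mp hs).1 b hb
    have ht : List.Pairwise (· ≤ ·) t := (List.pairwise_cons.mp hs).2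
    by_cases hav : a = v
    · subst hav
      have hPa : P a = false := by
        cases hpa : P a
        · rfl
        · exact absurd (hP a hpa) (lt_irrefl a)
      simp only [List.filter_cons, BEq.rfl]
      simp [ih ht, hPa]
    · by_cases hPa : P a = true
      · have hva : v < a := hP a hPa
        have hnil : t.filter (fun x => x == v) = [] := by
          apply List.filter_eq_nil_iff.mpr
          intro b hb
          have : v < b := lt_of_lt_of_le hva (ha b hb)
          simp; omega
        simp only [List.filter_cons]
        have : ((a == v) || P a) = true := by simp [hPa]
        rw [this]
        have : (a == v) = false := by simp [hav]
        rw [this]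
        simp [ih ht, hnil, hPa]
      · simp only [List.filter_cons]
        have h1 : ((a == v) || P a) = false := by simp [hav, hPa]
        have h2 : (a == v) = false := by simp [hav]
        rw [h1, h2]
        simp [ih ht, hPa]

lemma pv_beq_decide (x v : Int) : (x == v) = decide (x = v) := by
  rw [Bool.eq_iff_iff]; simp

lemma pv_if_count (v : Int) (s : List Int) :
    (if 0 < List.count v s then [v] else []) = (if v ∈ s then [v] else []) := by
  by_cases h : v ∈ s <;> simp [h, List.count_pos_iff]

/-- A's per-block filtered list has the same gap count as the canonical presence list. -/
lemma pv_gc_filter_window (s : List Int) (hs : List.Pairwise (· ≤ ·) s) (lo : Int) :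
    pvGc (s.filter (fun x => x == lo || (x == lo + 1 || (x == lo + 2 || x == lo + 3)))) =
    pvGc (pvC lo (decide (lo ∈ s)) (decide (lo + 1 ∈ s)) (decide (lo + 2 ∈ s)) (decide (lo + 3 ∈ s))) := by
  rw [pv_filter_split s hs lo _ (by intro x hx; simp at hx; rcases hx with h | h | h <;> omega)]
  rw [pv_filter_split s hs (lo + 1) _ (by intro x hx; simp at hx; rcases hx with h | h <;> omega)]
  rw [pv_filter_split s hs (lo + 2) _ (by intro x hx; simp at hx; omega)]
  have hb : ∀ v : Int, s.filter (fun x => x == v) = List.replicate (List.count v s) v :=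
    fun v => List.filter_beq v
  rw [hb lo, hb (lo + 1), hb (lo + 2)]
  rw [show (fun x => x == lo + 3) = (fun x : Int => x == lo + 3) from rfl, hb (lo + 3)]
  have h0 := pvGc_rep (List.count lo s) [] lo
    (List.replicate (List.count (lo + 1) s) (lo + 1) ++ (List.replicate (List.count (lo + 2) s) (lo + 2) ++ List.replicate (List.count (lo + 3) s) (lo + 3)))
  simp only [List.nil_append] at h0
  have h1 := pvGc_rep (List.count (lo + 1) s) (if 0 < List.count lo s then [lo] else []) (lo + 1)
    (List.replicate (List.count (lo + 2) s) (lo + 2) ++ List.replicate (List.count (lo + 3) s) (lo + 3))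
  simp only [List.append_assoc] at h1
  have h2 := pvGc_rep (List.count (lo + 2) s)
    ((if 0 < List.count lo s then [lo] else []) ++ (if 0 < List.count (lo + 1) s then [lo + 1] else [])) (lo + 2)
    (List.replicate (List.count (lo + 3) s) (lo + 3))
  simp only [List.append_assoc] at h2
  have h3 := pvGc_rep (List.count (lo + 3) s)
    ((if 0 < List.count lo s then [lo] else []) ++ ((if 0 < List.count (lo + 1) s then [lo + 1] else []) ++ (if 0 < List.count (lo + 2) s then [lo + 2] else []))) (lo + 3) []
  simp only [List.append_assoc, List.append_nil] at h3
  rw [h0, h1, h2, h3]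
  rw [pv_if_count lo s, pv_if_count (lo + 1) s, pv_if_count (lo + 2) s, pv_if_count (lo + 3) s]
  simp [pvC, List.append_assoc]

lemma pv_rloop : ∀ (l : List Int) (g : Int),
    (List.range (l.length - 1)).foldl (fun g k => if l.getD (k + 1) 0 - l.getD k 0 > 1 then g + 1 else g) g
    = g + pvGc l := by
  intro l
  induction l with
  | nil => intro g; simp [pvGc]
  | cons a t ih =>
    intro g
    match t with
    | [] => simp [pvGc]
    | b :: t' =>
      have hlen : (a :: b :: t').length - 1 = t'.length + 1 := by simp
      rw [hlen, List.range_succ_eq_map, List.foldl_cons, List.foldl_map]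
      have hrw : (List.range t'.length).foldl
          (fun gg k => if (a :: b :: t').getD (Nat.succ k + 1) 0 - (a :: b :: t').getD (Nat.succ k) 0 > 1 then gg + 1 else gg)
          (if (a :: b :: t').getD (0 + 1) 0 - (a :: b :: t').getD 0 0 > 1 then g + 1 else g)
          = (List.range t'.length).foldl
          (fun gg k => if (b :: t').getD (k + 1) 0 - (b :: t').getD k 0 > 1 then gg + 1 else gg)
          (if b - a > 1 then g + 1 else g) := by
        have hinit : (if (a :: b :: t').getD (0 + 1) 0 - (a :: b :: t').getD 0 0 > 1 then g + 1 else g)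
            = (if b - a > 1 then g + 1 else g) := by simp
        rw [hinit]
        congr 1
      rw [hrw]
      have := ih (if b - a > 1 then g + 1 else g)
      simp only [List.length_cons, Nat.add_sub_cancel] at this
      rw [this]
      have hgc : pvGc (a :: b :: t') = (if b - a > 1 then (1 : Int) else 0) + pvGc (b :: t') := rfl
      rw [hgc]
      split_ifs <;> ring

/-- A's inner index loop computes `pvGc`. -/
lemma pv_aloop (l : List Int) (g : Int) :
    (PySem.List.pyRange 1 (l.length : Int) 1).foldl (fun gaps i =>
        if PySem.List.pyGetD l i 0 - PySem.List.pyGetD l (i - 1) 0 > 1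
        then gaps + 1 else gaps) g = g + pvGc l := by
  rw [PySem.List.pyRange_one, List.foldl_map]
  have hm : ((l.length : Int) - 1).toNat = l.length - 1 := by omega
  rw [hm]
  have hfun : (List.range (l.length - 1)).foldl
      (fun gaps (k : Nat) => if PySem.List.pyGetD l (1 + (k : Int)) 0 - PySem.List.pyGetD l (1 + (k : Int) - 1) 0 > 1 then gaps + 1 else gaps) g
      = (List.range (l.length - 1)).foldl (fun gaps k => if l.getD (k + 1) 0 - l.getD k 0 > 1 then gaps + 1 else gaps) g := by
    congr 1
    funext gaps k
    have e1 : (1 + (k : Int)) = ((k + 1 : Nat) : Int) := by push_cast; ring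
    have e2 : (1 + (k : Int) - 1) = ((k : Nat) : Int) := by ring
    rw [e2, e1, PySem.List.pyGetD_natCast, PySem.List.pyGetD_natCast]
  rw [hfun]
  exact pv_rloop l g

/-- One block of A's outer loop, as a function of presence bits. -/
lemma pv_ablock (s : List Int) (hs : List.Pairwise (· ≤ ·) s) (lo g : Int) (block : PySem.Set Int)
    (hb : ∀ x ∈ s, PySem.Set.contains block x = (x == lo || (x == lo + 1 || (x == lo + 2 || x == lo + 3)))) :
    (let block_slots := s.filter (fun slot => PySem.Set.contains block slot)
     if 1 < block_slots.length then
       (PySem.List.pyRange 1 (block_slots.length : Int) 1).foldl (fun gaps i =>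
         if PySem.List.pyGetD block_slots i 0 - PySem.List.pyGetD block_slots (i - 1) 0 > 1
         then gaps + 1 else gaps) g
     else g)
    = g + pvGc (pvC lo (decide (lo ∈ s)) (decide (lo + 1 ∈ s)) (decide (lo + 2 ∈ s)) (decide (lo + 3 ∈ s))) := by
  have hfe : s.filter (fun slot => PySem.Set.contains block slot)
      = s.filter (fun x => x == lo || (x == lo + 1 || (x == lo + 2 || x == lo + 3))) :=
    List.filter_congr hb
  have hw := pv_gc_filter_window s hs lo
  show (if 1 < (s.filter (fun slot => PySem.Set.contains block slot)).length then
       (PySem.List.pyRange 1 ((s.filter (fun slot => PySem.Set.contains block slot)).length : Int) 1).foldl (fun gaps i =>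
         if PySem.List.pyGetD (s.filter (fun slot => PySem.Set.contains block slot)) i 0
            - PySem.List.pyGetD (s.filter (fun slot => PySem.Set.contains block slot)) (i - 1) 0 > 1
         then gaps + 1 else gaps) g
     else g) = _
  rw [hfe]
  by_cases hlen : 1 < (s.filter (fun x => x == lo || (x == lo + 1 || (x == lo + 2 || x == lo + 3)))).length
  · rw [if_pos hlen, pv_aloop, hw]
  · rw [if_neg hlen, ← hw, pvGc_short _ (by omega)]
    ring

/-- The presence table built by B answers membership for values 1..20. -/
lemma pv_present_get : ∀ (slots : List Int) (pr : List Bool) (v : Int),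
    1 ≤ v → v ≤ 20 → pr.length = 21 →
    PySem.List.pyGetD (slots.foldl (fun present s =>
        if 1 ≤ s ∧ s ≤ 20 then PySem.List.pySetD present s true else present) pr) v false
    = (decide (v ∈ slots) || PySem.List.pyGetD pr v false) := by
  intro slots
  induction slots with
  | nil => intro pr v h1 h2 _; simp
  | cons s t ih =>
    intro pr v h1 h2 hlen
    simp only [List.foldl_cons]
    by_cases hgs : 1 ≤ s ∧ s ≤ 20
    · rw [if_pos hgs]
      have hlen' : (PySem.List.pySetD pr s true).length = 21 := by
        rw [PySem.List.pySetD_of_nonneg pr true (by omega)]; simp [hlen]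
      rw [ih _ v h1 h2 hlen']
      rw [PySem.List.pySetD_of_nonneg pr true (by omega)]
      have hpy : ∀ (xs : List Bool), PySem.List.pyGetD xs v false = xs.getD v.toNat false := by
        intro xs
        conv_lhs => rw [show v = ((v.toNat : Nat) : Int) by omega]
        rw [PySem.List.pyGetD_natCast]
      rw [hpy, hpy]
      by_cases hvs : v = s
      · have htn : s.toNat = v.toNat := by omega
        have hidx : v.toNat < pr.length := by omega
        have hget : (pr.set s.toNat true).getD v.toNat false = true := by
          rw [htn]
          simp [List.getD, hidx]
        rw [hget]
        have hmem : v ∈ s :: t := by rw [hvs]; exact List.mem_cons_self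
        simp [hmem]
      · have htn : ¬ s.toNat = v.toNat := by omega
        have hget : (pr.set s.toNat true).getD v.toNat false = pr.getD v.toNat false := by
          simp [List.getD, htn]
        rw [hget]
        simp [List.mem_cons, hvs]
    · rw [if_neg hgs]
      rw [ih _ v h1 h2 hlen]
      have hvs : ¬ v = s := by omega
      simp [List.mem_cons, hvs]

/-- One block of B's outer loop computes `pvGc` of the canonical presence list. -/
lemma pv_bblock (present : List Bool) (lo g : Int) :
    ((PySem.List.pyRange lo (lo + 4) 1).foldl
      (fun (st : Int × Option Int) v =>
        if PySem.List.pyGetD present v false then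
          ((match st.2 with
            | some prev => if v - prev > 1 then st.1 + 1 else st.1
            | none => st.1), some v)
        else st)
      (g, none)).1
    = g + pvGc (pvC lo (PySem.List.pyGetD present lo false) (PySem.List.pyGetD present (lo + 1) false)
        (PySem.List.pyGetD present (lo + 2) false) (PySem.List.pyGetD present (lo + 3) false)) := by
  have hr : PySem.List.pyRange lo (lo + 4) 1 = [lo, lo + 1, lo + 2, lo + 3] := by
    rw [PySem.List.pyRange_one_cons (by omega), PySem.List.pyRange_one_cons (by omega),
        PySem.List.pyRange_one_cons (by omega), PySem.List.pyRange_one_cons (by omega),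
        PySem.List.pyRange_one_eq_nil (by omega)]
    norm_num
    exact ⟨by ring, by ring⟩
  rw [hr]
  by_cases h0 : PySem.List.pyGetD present lo false <;>
    by_cases h1 : PySem.List.pyGetD present (lo + 1) false <;>
      by_cases h2 : PySem.List.pyGetD present (lo + 2) false <;>
        by_cases h3 : PySem.List.pyGetD present (lo + 3) false <;>
          simp [List.foldl, h0, h1, h2, h3, pvC, pvGc]

-- ===== VERDICT (by name: the statement is the Claim_ definition above) =====
theorem calculate_day_gaps_spec : Claim_equal_calculate_day_gaps := by
  intro slots _
  unfold Spec_calculate_day_gaps calculate_day_gaps calculate_day_gaps_alt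
  have hs : List.Pairwise (· ≤ ·) (PySem.List.sorted slots (fun x => x) false) :=
    PySem.List.sorted_pairwise slots (fun x => x)
  have hb : ∀ (a b : Int), a + 4 = b →
      ∀ x ∈ PySem.List.sorted slots (fun x => x) false,
        PySem.Set.contains (PySem.Set.ofList (PySem.List.pyRange a b 1)) x
        = (x == a || (x == a + 1 || (x == a + 2 || x == a + 3))) := by
    intro a b hab x _
    subst hab
    have hof : PySem.Set.ofList (PySem.List.pyRange a (a + 4) 1) = [a, a + 1, a + 2, a + 3] := by
      have hr : PySem.List.pyRange a (a + 4) 1 = [a, a + 1, a + 2, a + 3] := by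
        rw [PySem.List.pyRange_one_cons (by omega), PySem.List.pyRange_one_cons (by omega),
            PySem.List.pyRange_one_cons (by omega), PySem.List.pyRange_one_cons (by omega),
            PySem.List.pyRange_one_eq_nil (by omega)]
        norm_num
        exact ⟨by ring, by ring⟩
      rw [hr]
      exact PySem.Set.ofList_eq_self_of_nodup _ (by simp)
    rw [hof]
    simp [PySem.Set.contains, pv_beq_decide]
  simp only [List.foldl_cons, List.foldl_nil]
  rw [pv_ablock _ hs 1 _ _ (hb 1 5 (by norm_num)),
      pv_ablock _ hs 5 _ _ (hb 5 9 (by norm_num)),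
      pv_ablock _ hs 9 _ _ (hb 9 13 (by norm_num)),
      pv_ablock _ hs 13 _ _ (hb 13 17 (by norm_num)),
      pv_ablock _ hs 17 _ _ (hb 17 21 (by norm_num))]
  rw [pv_bblock, pv_bblock, pv_bblock, pv_bblock, pv_bblock]
  have hpg : ∀ v : Int, 1 ≤ v → v ≤ 20 →
      PySem.List.pyGetD (slots.foldl (fun present s =>
          if 1 ≤ s ∧ s ≤ 20 then PySem.List.pySetD present s true else present)
        (List.replicate 21 false)) v false = decide (v ∈ slots) := by
    intro v h1 h2
    rw [pv_present_get slots _ v h1 h2 (by simp)]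
    have hrep : PySem.List.pyGetD (List.replicate 21 false) v false = false := by
      conv_lhs => rw [show v = ((v.toNat : Nat) : Int) by omega]
      rw [PySem.List.pyGetD_natCast]
      rw [List.getD]
      rcases h : (List.replicate 21 false)[v.toNat]? with _ | b
      · rfl
      · have := List.mem_of_getElem? h
        simp [List.eq_of_mem_replicate this]
    rw [hrep, Bool.or_false]
  rw [hpg 1 (by norm_num) (by norm_num), hpg (1 + 1) (by norm_num) (by norm_num),
      hpg (1 + 2) (by norm_num) (by norm_num), hpg (1 + 3) (by norm_num) (by norm_num),
      hpg 5 (by norm_num) (by norm_num), hpg (5 + 1) (by norm_num) (by norm_num),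
      hpg (5 + 2) (by norm_num) (by norm_num), hpg (5 + 3) (by norm_num) (by norm_num),
      hpg 9 (by norm_num) (by norm_num), hpg (9 + 1) (by norm_num) (by norm_num),
      hpg (9 + 2) (by norm_num) (by norm_num), hpg (9 + 3) (by norm_num) (by norm_num),
      hpg 13 (by norm_num) (by norm_num), hpg (13 + 1) (by norm_num) (by norm_num),
      hpg (13 + 2) (by norm_num) (by norm_num), hpg (13 + 3) (by norm_num) (by norm_num),
      hpg 17 (by norm_num) (by norm_num), hpg (17 + 1) (by norm_num) (by norm_num),
      hpg (17 + 2) (by norm_num) (by norm_num), hpg (17 + 3) (by norm_num) (by norm_num)]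
  have hmem : ∀ x : Int, decide (x ∈ PySem.List.sorted slots (fun x => x) false) = decide (x ∈ slots) := by
    intro x
    simp [PySem.List.mem_sorted]
  simp only [hmem]
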